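-- pv_equiv track=rewrite | github.com/ADRiordan41/nfl-fantasy-market | backend/scripts/export_fantasypros_mlb_projections.py | canonical_hitter_position
-- ===== SOURCE A (Python) =====
-- HITTER_POSITION_ORDER = ["C", "1B", "2B", "3B", "SS", "OF", "DH"]
--
-- HITTER_POSITION_ALIASES = {
--     "LF": "OF",
--     "CF": "OF",
--     "RF": "OF",
--     "UTIL": "DH",
--     "UT": "DH",
-- }
--
-- def canonical_hitter_position(positions: list[str]) -> str | None:
--     canonical: set[str] = set()
--     for position in positions:
--         mapped = HITTER_POSITION_ALIASES.get(position, position)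
--         if mapped in {"SP", "RP"}:
--             continue
--         canonical.add(mapped)
--
--     for position in HITTER_POSITION_ORDER:
--         if position in canonical:
--             return position
--     return None
-- ===== SOURCE B (Python) =====
-- HITTER_POSITION_ORDER = ["C", "1B", "2B", "3B", "SS", "OF", "DH"]
--
-- HITTER_POSITION_ALIASES = {
--     "LF": "OF",
--     "CF": "OF",
--     "RF": "OF",
--     "UTIL": "DH",
--     "UT": "DH",
-- }
--
-- _PRIORITY = {pos: i for i, pos in enumerate(HITTER_POSITION_ORDER)}
--
-- def canonical_hitter_position(positions: list[str]) -> str | None: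
--     best = None
--     for position in positions:
--         mapped = HITTER_POSITION_ALIASES.get(position, position)
--         idx = _PRIORITY.get(mapped)
--         if idx is not None and (best is None or idx < best):
--             best = idx
--     return None if best is None else HITTER_POSITION_ORDER[best]
-- ===== Notes on version B (the rewrite author's own statement) =====
-- stated objective: simpler
-- what changed: Replaced A's two-phase set-then-scan (build a set of mapped positions, then scan the priority list for the first member) by a single pass over the input that tracks only the minimum priority index via a precomputed position-to-index dict; the SP/RP skip branch and the set disappear.
import Mathlib
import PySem

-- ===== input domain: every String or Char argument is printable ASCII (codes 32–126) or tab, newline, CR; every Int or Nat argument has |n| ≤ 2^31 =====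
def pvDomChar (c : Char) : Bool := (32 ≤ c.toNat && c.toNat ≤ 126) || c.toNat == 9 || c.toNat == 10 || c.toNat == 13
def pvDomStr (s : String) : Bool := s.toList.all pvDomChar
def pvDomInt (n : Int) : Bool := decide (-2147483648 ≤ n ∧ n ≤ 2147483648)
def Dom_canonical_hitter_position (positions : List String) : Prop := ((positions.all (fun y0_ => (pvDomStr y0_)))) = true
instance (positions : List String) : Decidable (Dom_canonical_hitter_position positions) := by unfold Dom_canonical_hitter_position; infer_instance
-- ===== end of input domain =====

-- B replaces A's set-then-scan two-phase structure by a single pass tracking the minimum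
-- priority index via a precomputed position→index dict (objective: simpler).

-- ===== PORT A =====
def pvORDER : List String := ["C", "1B", "2B", "3B", "SS", "OF", "DH"]

def pvALIASES : PySem.Dict String String :=
  PySem.Dict.ofList [("LF", "OF"), ("CF", "OF"), ("RF", "OF"), ("UTIL", "DH"), ("UT", "DH")]

def canonical_hitter_position (positions : List String) : Option String :=
  let canonical : PySem.Set String :=
    positions.foldl (fun canonical position =>
      let mapped := pvALIASES.getD position position
      if mapped = "SP" ∨ mapped = "RP" then canonical
      else PySem.Set.add canonical mapped) (PySem.Set.ofList [])
  -- second loop: return the first order position contained in `canonical`, else None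
  pvORDER.find? (fun position => PySem.Set.contains canonical position)

-- ===== PORT B =====
def pvPRIORITY : PySem.Dict String Int :=
  PySem.Dict.ofList ((PySem.List.enumerate pvORDER).map (fun ip => (ip.2, ip.1)))

def canonical_hitter_position_alt (positions : List String) : Option String :=
  let best : Option Int :=
    positions.foldl (fun best position =>
      let mapped := pvALIASES.getD position position
      match pvPRIORITY.get? mapped with
      | none => best
      | some idx =>
        match best with
        | none => some idx
        | some b => if idx < b then some idx else some b) none
  match best with
  | none => none
  | some b => PySem.List.pyGet? pvORDER b  -- b is always a valid index into pvORDER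

-- ===== PRECONDITION & SPEC =====
def Spec_canonical_hitter_position (positions : List String) (out : Option String) : Prop := out = canonical_hitter_position_alt positions
instance (positions : List String) (out : Option String) : Decidable (Spec_canonical_hitter_position positions out) := by unfold Spec_canonical_hitter_position; infer_instance

-- ===== CLAIM (what is proved, stated in full; the proofs are below) =====
def Claim_equal_canonical_hitter_position : Prop := ∀ (positions : List String), Dom_canonical_hitter_position positions → Spec_canonical_hitter_position positions (canonical_hitter_position positions)

-- ===== LEMMAS AND PROOFS =====

-- the index of the first ORDER position contained in s (coupling abstraction for both folds)
def pvScanIdx (s : PySem.Set String) : Option Int :=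
  if "C" ∈ s then some 0 else if "1B" ∈ s then some 1 else if "2B" ∈ s then some 2
  else if "3B" ∈ s then some 3 else if "SS" ∈ s then some 4 else if "OF" ∈ s then some 5
  else if "DH" ∈ s then some 6 else none

-- A's loop body and B's loop body, named (definitionally equal to the ports' lambdas)
def pvStepA (s : PySem.Set String) (position : String) : PySem.Set String :=
  if pvALIASES.getD position position = "SP" ∨ pvALIASES.getD position position = "RP" then s
  else PySem.Set.add s (pvALIASES.getD position position)

def pvStepB (best : Option Int) (position : String) : Option Int :=
  match pvPRIORITY.get? (pvALIASES.getD position position) with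
  | none => best
  | some idx =>
    match best with
    | none => some idx
    | some b => if idx < b then some idx else some b

set_option maxHeartbeats 1000000 in
theorem pvPRIORITY_lit : pvPRIORITY = PySem.Dict.mk [("C",(0:Int)),("1B",1),("2B",2),("3B",3),("SS",4),("OF",5),("DH",6)] := by decide

set_option maxHeartbeats 1000000 in
theorem pvPrio_get (m : String) :
    pvPRIORITY.get? m =
      if "C" == m then some 0 else if "1B" == m then some 1 else if "2B" == m then some 2
      else if "3B" == m then some 3 else if "SS" == m then some 4 else if "OF" == m then some 5
      else if "DH" == m then some 6 else none := by
  rw [pvPRIORITY_lit]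
  simp only [PySem.Dict.get?_mk_cons]
  rfl

-- the coupling step: one loop iteration preserves pvScanIdx (A's state) = B's state
set_option maxHeartbeats 2000000 in
theorem pvStep_couple (s : PySem.Set String) (best : Option Int) (x : String)
    (h : pvScanIdx s = best) : pvScanIdx (pvStepA s x) = pvStepB best x := by
  subst h
  unfold pvStepA pvStepB
  generalize pvALIASES.getD x x = m
  rw [pvPrio_get]
  by_cases h0 : m = "C"
  · subst h0
    simp [pvScanIdx, PySem.Set.mem_add]
    split_ifs <;> simp_all
  by_cases h1 : m = "1B"
  · subst h1
    simp [pvScanIdx, PySem.Set.mem_add]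
    split_ifs <;> simp_all
  by_cases h2 : m = "2B"
  · subst h2
    simp [pvScanIdx, PySem.Set.mem_add]
    split_ifs <;> simp_all
  by_cases h3 : m = "3B"
  · subst h3
    simp [pvScanIdx, PySem.Set.mem_add]
    split_ifs <;> simp_all
  by_cases h4 : m = "SS"
  · subst h4
    simp [pvScanIdx, PySem.Set.mem_add]
    split_ifs <;> simp_all
  by_cases h5 : m = "OF"
  · subst h5
    simp [pvScanIdx, PySem.Set.mem_add]
    split_ifs <;> simp_all
  by_cases h6 : m = "DH"
  · subst h6
    simp [pvScanIdx, PySem.Set.mem_add]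
    split_ifs <;> simp_all
  have c0 : ¬ ("C" = m) := fun h => h0 h.symm
  have c1 : ¬ ("1B" = m) := fun h => h1 h.symm
  have c2 : ¬ ("2B" = m) := fun h => h2 h.symm
  have c3 : ¬ ("3B" = m) := fun h => h3 h.symm
  have c4 : ¬ ("SS" = m) := fun h => h4 h.symm
  have c5 : ¬ ("OF" = m) := fun h => h5 h.symm
  have c6 : ¬ ("DH" = m) := fun h => h6 h.symm
  by_cases hsp : m = "SP" ∨ m = "RP"
  · simp [hsp, c0, c1, c2, c3, c4, c5, c6]
  · simp [hsp, pvScanIdx, PySem.Set.mem_add, c0, c1, c2, c3, c4, c5, c6]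

theorem pvFold_couple (positions : List String) (s : PySem.Set String) (best : Option Int)
    (h : pvScanIdx s = best) :
    pvScanIdx (positions.foldl pvStepA s) = positions.foldl pvStepB best := by
  induction positions generalizing s best with
  | nil => exact h
  | cons x xs ih => exact ih _ _ (pvStep_couple s best x h)

-- A's answer as a function of pvScanIdx
theorem pvScanA_eq (s : PySem.Set String) :
    pvORDER.find? (fun position => PySem.Set.contains s position) =
      match pvScanIdx s with
      | none => none
      | some b => PySem.List.pyGet? pvORDER b := by
  simp only [pvORDER, List.find?]
  simp [pvScanIdx, PySem.Set.contains]
  split_ifs <;> simp_all [PySem.List.pyGet?, PySem.List.pyIdx?]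

-- ===== VERDICT (by name: the statement is the Claim_ definition above) =====
theorem canonical_hitter_position_spec : Claim_equal_canonical_hitter_position := by
  intro positions _
  unfold Spec_canonical_hitter_position
  show pvORDER.find? _ = _
  rw [show (fun canonical position =>
      let mapped := pvALIASES.getD position position
      if mapped = "SP" ∨ mapped = "RP" then canonical
      else PySem.Set.add canonical mapped) = pvStepA from rfl]
  rw [pvScanA_eq, pvFold_couple positions (PySem.Set.ofList []) none (by decide)]
  rfl
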